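-- pv_equiv track=rewrite | github.com/gregoryann/Python-Beginner-Examples | +1500 Python Challenges/Medium/Don't Roll Doubles.py | dice_game
-- ===== SOURCE A (Python) =====
-- def dice_game(lst):
--     myScore = 0
--     for i in range(len(lst)):
--         if lst[i][0] == lst[i][1]:
--             myScore = 0
--             break
--         else:
--             myScore += lst[i][0] + lst[i][1]
--     return myScore
-- ===== SOURCE B (Python) =====
-- def dice_game(lst):
--     # Back-to-front traversal: walk the rolls in reverse, keeping a flag
--     # recording whether a double has been seen; any double forces the
--     # final score to 0 regardless of position, so order does not matter.
--     total = 0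
--     doubled = False
--     for a, b in reversed(lst):
--         if a == b:
--             doubled = True
--             total = 0
--         elif not doubled:
--             total += a + b
--     return total
-- ===== Notes on version B (the rewrite author's own statement) =====
-- stated objective: alternative
-- what changed: B traverses the list back-to-front with a doubled flag (any double forces 0, so traversal order is irrelevant) instead of A's forward accumulate-and-break index loop.
import Mathlib
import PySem

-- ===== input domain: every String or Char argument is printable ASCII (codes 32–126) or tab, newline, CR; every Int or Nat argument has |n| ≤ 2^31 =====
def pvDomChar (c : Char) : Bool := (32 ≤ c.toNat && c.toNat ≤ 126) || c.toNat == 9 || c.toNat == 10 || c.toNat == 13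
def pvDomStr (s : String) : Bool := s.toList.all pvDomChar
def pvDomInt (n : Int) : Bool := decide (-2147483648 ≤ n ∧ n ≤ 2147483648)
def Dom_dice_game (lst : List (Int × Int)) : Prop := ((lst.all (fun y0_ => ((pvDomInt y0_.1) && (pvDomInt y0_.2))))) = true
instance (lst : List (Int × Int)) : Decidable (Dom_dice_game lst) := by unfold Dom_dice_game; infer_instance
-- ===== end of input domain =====

-- B traverses the list back-to-front with a doubled flag instead of A's forward accumulate-and-break loop (alternative decomposition).

-- ===== PORT A =====
-- Port of A: forward index loop with accumulator and break, as structural recursion over the list.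
def dice_game_loop (rest : List (Int × Int)) (myScore : Int) : Int :=
  match rest with
  | [] => myScore
  | p :: rest' => if p.1 = p.2 then 0 else dice_game_loop rest' (myScore + p.1 + p.2)

def dice_game (lst : List (Int × Int)) : Int := dice_game_loop lst 0

-- ===== PORT B =====
-- Port of B: fold over the reversed list with state (total, doubled).
def dice_game_alt_step (st : Int × Bool) (p : Int × Int) : Int × Bool :=
  if p.1 == p.2 then (0, true)
  else if !st.2 then (st.1 + p.1 + p.2, st.2)
  else st

def dice_game_alt (lst : List (Int × Int)) : Int :=
  (lst.reverse.foldl dice_game_alt_step (0, false)).1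

-- ===== PRECONDITION & SPEC =====
def Spec_dice_game (lst : List (Int × Int)) (out : Int) : Prop := out = dice_game_alt lst
instance (lst : List (Int × Int)) (out : Int) : Decidable (Spec_dice_game lst out) := by unfold Spec_dice_game; infer_instance

-- ===== CLAIM (what is proved, stated in full; the proofs are below) =====
def Claim_equal_dice_game : Prop := ∀ (lst : List (Int × Int)), Dom_dice_game lst → Spec_dice_game lst (dice_game lst)

-- ===== LEMMAS AND PROOFS =====
theorem loopA_eq (rest : List (Int × Int)) (acc : Int) :
    dice_game_loop rest acc =
      if rest.any (fun x => x.1 == x.2) then 0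
      else acc + (rest.map (fun x => x.1 + x.2)).sum := by
  induction rest generalizing acc with
  | nil => simp [dice_game_loop]
  | cons p t ih =>
    simp only [dice_game_loop, List.any_cons, List.map_cons, List.sum_cons]
    by_cases h : p.1 = p.2
    · simp [h]
    · have hb : (p.1 == p.2) = false := by simp [h]
      rw [ih, hb]
      simp only [Bool.false_or]
      split_ifs with hany
      · rfl
      · ring

theorem foldB_true (r : List (Int × Int)) (t : Int) :
    r.foldl dice_game_alt_step (t, true) = ((if r.any (fun x => x.1 == x.2) then 0 else t), true) := by
  induction r generalizing t with
  | nil => simp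
  | cons p r' ih =>
    simp only [List.foldl_cons, dice_game_alt_step, List.any_cons]
    by_cases h : p.1 = p.2
    · simp [h, ih]
    · have hb : (p.1 == p.2) = false := by simp [h]
      simp only [hb, Bool.false_eq_true, if_false, Bool.not_true, Bool.false_or]
      exact ih t

theorem foldB_false (r : List (Int × Int)) (t : Int) :
    (r.foldl dice_game_alt_step (t, false)).1 =
      if r.any (fun x => x.1 == x.2) then 0
      else t + (r.map (fun x => x.1 + x.2)).sum := by
  induction r generalizing t with
  | nil => simp
  | cons p r' ih =>
    simp only [List.foldl_cons, dice_game_alt_step, List.any_cons, List.map_cons, List.sum_cons]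
    by_cases h : p.1 = p.2
    · simp [h, foldB_true]
    · have hb : (p.1 == p.2) = false := by simp [h]
      simp only [hb, Bool.false_eq_true, if_false, Bool.not_false, if_true, Bool.false_or]
      rw [ih]
      split_ifs with hany
      · rfl
      · ring

-- ===== VERDICT (by name: the statement is the Claim_ definition above) =====
theorem dice_game_spec : Claim_equal_dice_game := by
  intro lst _
  unfold Spec_dice_game dice_game dice_game_alt
  rw [loopA_eq, foldB_false]
  simp only [List.any_reverse, List.map_reverse, List.sum_reverse]
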